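-- pv_equiv track=rewrite | github.com/altoid/leetcode | py/longest_palindromic_substring.py | check_odd_pdrome
-- ===== SOURCE A (Python) =====
-- def check_odd_pdrome(s, i):
--     """
--     find the longest odd-length palindrome whose center is i.  return i and the radius
--     """
--     radius = 0
--
--     while True:
--         left = i - radius
--         right = i + radius
--
--         if left < 0:
--             break
--         if right >= len(s):
--             break
--
--         if s[left] != s[right]:
--             break
--
--         radius += 1
--
--     return i, radius - 1
-- ===== SOURCE B (Python) =====
-- from itertools import takewhile
--
-- def check_odd_pdrome(s, i):
--     """
--     find the longest odd-length palindrome whose center is i.  return i and the radius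
--     """
--     if i < 0 or i >= len(s):
--         return i, -1
--     left = s[:i][::-1]
--     right = s[i + 1:]
--     radius = sum(1 for _ in takewhile(lambda p: p[0] == p[1], zip(left, right)))
--     return i, radius
-- ===== Notes on version B (the rewrite author's own statement) =====
-- stated objective: idiomatic
-- what changed: Replaced the while-True loop with index arithmetic and break statements by a single guard plus a longest-common-prefix count of the reversed left slice zipped with the right slice.
import Mathlib
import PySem

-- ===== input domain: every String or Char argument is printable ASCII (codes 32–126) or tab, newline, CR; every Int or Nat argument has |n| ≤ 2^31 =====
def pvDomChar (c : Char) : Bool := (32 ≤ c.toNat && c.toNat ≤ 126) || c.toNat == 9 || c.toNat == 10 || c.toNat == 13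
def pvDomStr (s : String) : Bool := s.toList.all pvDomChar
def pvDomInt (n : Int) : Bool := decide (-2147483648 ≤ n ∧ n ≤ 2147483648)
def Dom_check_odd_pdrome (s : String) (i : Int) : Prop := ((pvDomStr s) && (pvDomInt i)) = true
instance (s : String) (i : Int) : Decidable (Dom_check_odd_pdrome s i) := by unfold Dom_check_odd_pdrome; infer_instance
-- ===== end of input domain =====

-- B replaces the while-True/break loop by a guard plus a common-prefix count of the
-- reversed left slice zipped with the right slice (idiomatic; same cost).

-- ===== PORT A =====
-- the 'while True' loop of A; state = radius (terminates: the loop continues only while i+radius < len)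
def pvLoopA (cs : List Char) (i : Int) (radius : Nat) : Int :=
  let left : Int := i - radius
  let right : Int := i + radius
  if left < 0 then (radius : Int) - 1
  else if right ≥ cs.length then (radius : Int) - 1
  else if PySem.List.pyGet? cs left ≠ PySem.List.pyGet? cs right then (radius : Int) - 1
  else pvLoopA cs i (radius + 1)
termination_by cs.length - radius
decreasing_by
  simp only [not_lt, ge_iff_le] at *
  omega

def check_odd_pdrome (s : String) (i : Int) : Int × Int :=
  (i, pvLoopA s.toList i 0)

-- ===== PORT B =====
-- length of the longest common prefix of two lists (the takewhile/zip count in Source B)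
def pvMatchCount : List Char → List Char → Int
  | a :: as, b :: bs => if a = b then 1 + pvMatchCount as bs else 0
  | _, _ => 0

def check_odd_pdrome_alt (s : String) (i : Int) : Int × Int :=
  let cs := s.toList
  if i < 0 ∨ i ≥ (cs.length : Int) then (i, -1)
  else
    -- s[:i][::-1] and s[i+1:]; exact here since 0 ≤ i < len s
    (i, pvMatchCount ((cs.take i.toNat).reverse) (cs.drop (i.toNat + 1)))

-- ===== PRECONDITION & SPEC =====
def Spec_check_odd_pdrome (s : String) (i : Int) (out : Int × Int) : Prop := out = check_odd_pdrome_alt s i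
instance (s : String) (i : Int) (out : Int × Int) : Decidable (Spec_check_odd_pdrome s i out) := by unfold Spec_check_odd_pdrome; infer_instance

-- ===== CLAIM (what is proved, stated in full; the proofs are below) =====
def Claim_equal_check_odd_pdrome : Prop := ∀ (s : String) (i : Int), Dom_check_odd_pdrome s i → Spec_check_odd_pdrome s i (check_odd_pdrome s i)

-- ===== LEMMAS AND PROOFS =====

lemma pvMatchCount_cons (a b : Char) (as bs : List Char) :
    pvMatchCount (a :: as) (b :: bs) = if a = b then 1 + pvMatchCount as bs else 0 := rfl

lemma pvLoopA_eq (cs : List Char) (i : Int) (radius : Nat) :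
    pvLoopA cs i radius =
      if i - radius < 0 then (radius : Int) - 1
      else if i + radius ≥ cs.length then (radius : Int) - 1
      else if PySem.List.pyGet? cs (i - radius) ≠ PySem.List.pyGet? cs (i + radius) then (radius : Int) - 1
      else pvLoopA cs i (radius + 1) := by
  rw [pvLoopA]

lemma loop_mc (k : Nat) : ∀ (cs : List Char) (i : Int) (r : Nat),
    0 ≤ i → i < cs.length → cs.length ≤ r + k →
    pvLoopA cs i (r + 1) =
      (r : Int) + pvMatchCount (((cs.take i.toNat).reverse).drop r) ((cs.drop (i.toNat + 1)).drop r) := by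
  induction k with
  | zero =>
    intro cs i r h0 h1 hk
    rw [pvLoopA_eq]
    have hL : ((cs.take i.toNat).reverse).drop r = [] := by
      apply List.drop_eq_nil_of_le; simp; omega
    have : i - (↑(r + 1) : Int) < 0 := by push_cast; omega
    simp only [this, if_pos]
    rw [hL]; simp [pvMatchCount]
  | succ k ih =>
    intro cs i r h0 h1 hk
    rw [pvLoopA_eq]
    by_cases hl : i - (↑(r + 1) : Int) < 0
    · have hL : ((cs.take i.toNat).reverse).drop r = [] := by
        apply List.drop_eq_nil_of_le; simp; omega
      simp only [hl, if_pos]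
      rw [hL]; simp [pvMatchCount]
    · simp only [hl, if_neg, not_false_iff]
      by_cases hr : i + (↑(r + 1) : Int) ≥ (cs.length : Int)
      · have hR : ((cs.drop (i.toNat + 1))).drop r = [] := by
          apply List.drop_eq_nil_of_le; simp; omega
        simp only [hr, if_pos]
        rw [hR]
        cases hD : ((cs.take i.toNat).reverse).drop r <;> simp [pvMatchCount]
      · simp only [hr, if_neg, not_false_iff]
        -- both indices are in range
        have hlr : (0:Int) ≤ i - ↑(r + 1) := by omega
        have hrl : i + (↑(r + 1):Int) < cs.length := by omega
        have hlt : i - (↑(r+1):Int) < cs.length := by omega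
        have e1 : PySem.List.pyGet? cs (i - ↑(r + 1)) = some cs[(i - (↑(r+1):Int)).toNat] := by
          apply PySem.List.pyGet?_eq_some_getElem <;> omega
        have e2 : PySem.List.pyGet? cs (i + ↑(r + 1)) = some cs[(i + (↑(r+1):Int)).toNat] := by
          apply PySem.List.pyGet?_eq_some_getElem <;> omega
        have hrlen : r < ((cs.take i.toNat).reverse).length := by simp; omega
        have hrlen2 : r < (cs.drop (i.toNat + 1)).length := by simp; omega
        have hLd : ((cs.take i.toNat).reverse).drop r
            = ((cs.take i.toNat).reverse)[r] :: ((cs.take i.toNat).reverse).drop (r + 1) :=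
          List.drop_eq_getElem_cons hrlen
        have hRd : (cs.drop (i.toNat + 1)).drop r
            = (cs.drop (i.toNat + 1))[r] :: (cs.drop (i.toNat + 1)).drop (r + 1) :=
          List.drop_eq_getElem_cons hrlen2
        have hLe : ((cs.take i.toNat).reverse)[r] = cs[(i - (↑(r+1):Int)).toNat]'(by omega) := by
          rw [List.getElem_reverse]
          rw [List.getElem_take]
          congr 1
          simp at hrlen ⊢
          omega
        have hRe : (cs.drop (i.toNat + 1))[r] = cs[(i + (↑(r+1):Int)).toNat]'(by omega) := by
          rw [List.getElem_drop]
          congr 1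
          omega
        rw [hLd, hRd, hLe, hRe]
        by_cases hc : cs[(i - (↑(r+1):Int)).toNat] = cs[(i + (↑(r+1):Int)).toNat]
        · have : ¬ (PySem.List.pyGet? cs (i - ↑(r + 1)) ≠ PySem.List.pyGet? cs (i + ↑(r + 1))) := by
            rw [e1, e2, hc]; simp
          simp only [this, if_neg, not_false_iff]
          rw [ih cs i (r + 1) h0 h1 (by omega)]
          simp only [pvMatchCount_cons, if_pos hc]
          push_cast; ring
        · have : PySem.List.pyGet? cs (i - ↑(r + 1)) ≠ PySem.List.pyGet? cs (i + ↑(r + 1)) := by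
            rw [e1, e2]; simpa using hc
          rw [if_pos this]
          simp only [pvMatchCount_cons, if_neg hc]
          push_cast; ring

-- ===== VERDICT (by name: the statement is the Claim_ definition above) =====
theorem check_odd_pdrome_spec : Claim_equal_check_odd_pdrome := by
  intro s i _
  unfold Spec_check_odd_pdrome check_odd_pdrome check_odd_pdrome_alt
  set cs := s.toList with hcs
  by_cases hneg : i < 0
  · rw [pvLoopA_eq]
    simp [hneg]
  · by_cases hbig : i ≥ (cs.length : Int)
    · rw [pvLoopA_eq]
      simp only [Nat.cast_zero, sub_zero, add_zero]
      rw [if_neg (by omega), if_pos (by omega)]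
      simp [hneg, hbig]
    · have h0 : 0 ≤ i := by omega
      have h1 : i < (cs.length : Int) := by omega
      rw [pvLoopA_eq]
      simp only [Nat.cast_zero, sub_zero, add_zero]
      rw [if_neg (by omega), if_neg (by omega), if_neg (by simp)]
      have := loop_mc cs.length cs i 0 h0 h1 (by omega)
      simp only [Nat.cast_zero, zero_add, List.drop_zero] at this
      norm_num
      rw [this, if_neg (by omega)]
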